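-- pv_equiv track=rewrite | github.com/caceres-juan99/Encriptado-y-Desencriptador-Algoritmo-AFINx4 | Desencriptado sin claves.py | analisis_linguistico
-- ===== SOURCE A (Python) =====
-- def analisis_linguistico(texto_desencriptado):
--     # Ejemplo de análisis de frecuencia de consonantes y vocales
--     consonantes_comunes = 'rnsln'  # Algunas consonantes comunes en español
--     vocales_comunes = 'aeo'  # Algunas vocales comunes en español
--     frecuencias_consonantes = sum(1 for char in texto_desencriptado if char in consonantes_comunes)
--     frecuencias_vocales = sum(1 for char in texto_desencriptado if char in vocales_comunes)
--
--     # Si el texto tiene una buena distribución de consonantes y vocales, podemos considerarlo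
--     if frecuencias_consonantes > 2 and frecuencias_vocales > 2:
--         return True
--     return False
-- ===== SOURCE B (Python) =====
-- def analisis_linguistico(texto_desencriptado):
--     # Single fused pass with early exit: counters only grow, so both exceeding 2
--     # at any point is equivalent to both exceeding 2 at the end.
--     cons = 0
--     voc = 0
--     for ch in texto_desencriptado:
--         if ch in 'rnsl':
--             cons += 1
--         elif ch in 'aeo':
--             voc += 1
--         if cons > 2 and voc > 2:
--             return True
--     return False
-- ===== Notes on version B (the rewrite author's own statement) =====
-- stated objective: alternative
-- what changed: A's two staged full membership scans are replaced by one fused pass maintaining both counters with an early return as soon as both thresholds are exceeded (valid since the counters are monotone).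
import Mathlib
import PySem

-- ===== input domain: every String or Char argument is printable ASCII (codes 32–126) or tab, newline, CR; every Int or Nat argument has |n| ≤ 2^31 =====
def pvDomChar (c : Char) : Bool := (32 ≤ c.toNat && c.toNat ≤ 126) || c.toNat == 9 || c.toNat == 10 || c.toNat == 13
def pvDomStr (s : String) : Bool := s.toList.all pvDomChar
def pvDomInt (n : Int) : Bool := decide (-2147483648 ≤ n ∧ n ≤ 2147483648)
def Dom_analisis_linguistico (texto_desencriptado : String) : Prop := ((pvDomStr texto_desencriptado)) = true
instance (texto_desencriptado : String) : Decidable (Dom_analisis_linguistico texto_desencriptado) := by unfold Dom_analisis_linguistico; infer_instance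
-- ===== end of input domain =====

-- B replaces A's two staged full scans by one fused pass with an early return once both
-- counters exceed 2 (objective: alternative); same return value on every input.

-- ===== PORT A =====
-- A: two generator-sum passes, each testing membership of the char in a literal string.
def analisis_linguistico (texto_desencriptado : String) : Bool :=
  let consonantes_comunes := "rnsln"
  let vocales_comunes := "aeo"
  let frecuencias_consonantes : Int :=
    texto_desencriptado.toList.foldl
      (fun acc char => if consonantes_comunes.toList.contains char then acc + 1 else acc) 0
  let frecuencias_vocales : Int :=
    texto_desencriptado.toList.foldl
      (fun acc char => if vocales_comunes.toList.contains char then acc + 1 else acc) 0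
  if frecuencias_consonantes > 2 ∧ frecuencias_vocales > 2 then true else false

-- ===== PORT B =====
-- B: one loop over the characters keeping both counters, returning true as soon as
-- both exceed 2 (the for/return of Source B becomes this structural recursion).
def pvAltLoop : List Char → Int → Int → Bool
  | [], _, _ => false
  | ch :: t, cons, voc =>
    let cons' := if "rnsl".toList.contains ch then cons + 1 else cons
    let voc'  := if ¬ "rnsl".toList.contains ch ∧ "aeo".toList.contains ch then voc + 1 else voc
    if cons' > 2 ∧ voc' > 2 then true else pvAltLoop t cons' voc'

def analisis_linguistico_alt (texto_desencriptado : String) : Bool :=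
  pvAltLoop texto_desencriptado.toList 0 0

-- ===== PRECONDITION & SPEC =====
def Spec_analisis_linguistico (texto_desencriptado : String) (out : Bool) : Prop := out = analisis_linguistico_alt texto_desencriptado
instance (texto_desencriptado : String) (out : Bool) : Decidable (Spec_analisis_linguistico texto_desencriptado out) := by unfold Spec_analisis_linguistico; infer_instance

-- ===== CLAIM (what is proved, stated in full; the proofs are below) =====
def Claim_equal_analisis_linguistico : Prop := ∀ (texto_desencriptado : String), Dom_analisis_linguistico texto_desencriptado → Spec_analisis_linguistico texto_desencriptado (analisis_linguistico texto_desencriptado)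

-- ===== LEMMAS AND PROOFS =====

-- total consonant / vowel counts of a character list, as Int
def pvC (l : List Char) : Int := l.count 'r' + l.count 'n' + l.count 's' + l.count 'l'
def pvV (l : List Char) : Int := l.count 'a' + l.count 'e' + l.count 'o'

theorem pvC_nonneg (l : List Char) : 0 ≤ pvC l := by unfold pvC; positivity

theorem pvV_nonneg (l : List Char) : 0 ≤ pvV l := by unfold pvV; positivity

theorem rnsl_toList : "rnsl".toList = ['r','n','s','l'] := by decide

theorem aeo_toList : "aeo".toList = ['a','e','o'] := by decide

theorem rnsln_toList : "rnsln".toList = ['r','n','s','l','n'] := by decide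

theorem pvC_cons_mem {c : Char} (t : List Char) (h : "rnsl".toList.contains c = true) :
    pvC (c :: t) = pvC t + 1 := by
  rw [rnsl_toList] at h
  simp only [List.contains_eq_mem, List.mem_cons, List.not_mem_nil, or_false,
    decide_eq_true_eq] at h
  rcases h with h | h | h | h <;> subst h <;>
    simp [pvC] <;> ring

theorem pvC_cons_not {c : Char} (t : List Char) (h : ¬ "rnsl".toList.contains c = true) :
    pvC (c :: t) = pvC t := by
  rw [rnsl_toList] at h
  simp only [List.contains_eq_mem, List.mem_cons, List.not_mem_nil, or_false,
    decide_eq_true_eq, not_or] at h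
  simp [pvC, h.1, h.2.1, h.2.2.1, h.2.2.2]

theorem pvV_cons_mem {c : Char} (t : List Char) (h : "aeo".toList.contains c = true) :
    pvV (c :: t) = pvV t + 1 := by
  rw [aeo_toList] at h
  simp only [List.contains_eq_mem, List.mem_cons, List.not_mem_nil, or_false,
    decide_eq_true_eq] at h
  rcases h with h | h | h <;> subst h <;>
    simp [pvV] <;> ring

theorem pvV_cons_not {c : Char} (t : List Char) (h : ¬ "aeo".toList.contains c = true) :
    pvV (c :: t) = pvV t := by
  rw [aeo_toList] at h
  simp only [List.contains_eq_mem, List.mem_cons, List.not_mem_nil, or_false,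
    decide_eq_true_eq, not_or] at h
  simp [pvV, h.1, h.2.1, h.2.2]

theorem rnsl_not_aeo {c : Char} (h : "rnsl".toList.contains c = true) :
    ¬ "aeo".toList.contains c = true := by
  rw [rnsl_toList] at h
  rw [aeo_toList]
  simp only [List.contains_eq_mem, List.mem_cons, List.not_mem_nil, or_false,
    decide_eq_true_eq, not_or] at h ⊢
  rcases h with h | h | h | h <;> subst h <;> decide

-- A's consonant scan counts exactly the occurrences of 'r','n','s','l'.
theorem foldl_cons_count (l : List Char) (k : Int) :
    l.foldl (fun acc char => if ("rnsln".toList.contains char) then acc + 1 else acc) k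
      = k + pvC l := by
  induction l generalizing k with
  | nil => simp [pvC]
  | cons c t ih =>
    have hiff : ("rnsln".toList.contains c = true) ↔ ("rnsl".toList.contains c = true) := by
      rw [rnsln_toList, rnsl_toList]
      simp only [List.contains_eq_mem, decide_eq_true_eq, List.mem_cons, List.not_mem_nil,
        or_false]
      tauto
    simp only [List.foldl_cons, ih]
    by_cases h : "rnsl".toList.contains c = true
    · rw [if_pos (hiff.mpr h), pvC_cons_mem t h]; ring
    · rw [if_neg (fun hh => h (hiff.mp hh)), pvC_cons_not t h]

-- A's vowel scan counts exactly the occurrences of 'a','e','o'.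
theorem foldl_voc_count (l : List Char) (k : Int) :
    l.foldl (fun acc char => if ("aeo".toList.contains char) then acc + 1 else acc) k
      = k + pvV l := by
  induction l generalizing k with
  | nil => simp [pvV]
  | cons c t ih =>
    simp only [List.foldl_cons, ih]
    by_cases h : "aeo".toList.contains c = true
    · rw [if_pos h, pvV_cons_mem t h]; ring
    · rw [if_neg h, pvV_cons_not t h]

-- B's fused early-exit loop returns true iff the FINAL totals both exceed 2
-- (the counters are monotone), provided the list is nonempty; on [] it is false.
theorem pvAltLoop_cons_aux (t : List Char) (cons' voc' C V : Int)
    (hC : cons' + pvC t = C) (hV : voc' + pvV t = V) :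
    (if cons' > 2 ∧ voc' > 2 then true
     else (decide (t ≠ []) && decide (cons' + pvC t > 2 ∧ voc' + pvV t > 2)))
      = decide (C > 2 ∧ V > 2) := by
  have hc0 := pvC_nonneg t
  have hv0 := pvV_nonneg t
  split_ifs with h
  · symm
    simp only [decide_eq_true_eq]
    omega
  · rcases t with _ | ⟨d, t'⟩
    · simp only [pvC, pvV, List.count_nil] at hC hV
      symm
      simp only [ne_eq, not_true_eq_false, decide_false, Bool.false_and,
        decide_eq_false_iff_not]
      push_cast at hC hV
      omega
    · rw [hC, hV]
      simp

theorem pvAltLoop_eq (l : List Char) (cons voc : Int) :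
    pvAltLoop l cons voc
      = (decide (l ≠ []) && decide (cons + pvC l > 2 ∧ voc + pvV l > 2)) := by
  induction l generalizing cons voc with
  | nil => simp [pvAltLoop]
  | cons c t ih =>
    simp only [pvAltLoop, ih, ne_eq, reduceCtorEq, not_false_eq_true, decide_true,
      Bool.true_and]
    by_cases h1 : "rnsl".toList.contains c = true
    · have h2 := rnsl_not_aeo h1
      simp only [h1, if_true, h2, false_and, not_true_eq_false, if_false]
      exact pvAltLoop_cons_aux t (cons + 1) voc _ _
        (by rw [pvC_cons_mem t h1]; ring) (by rw [pvV_cons_not t h2])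
    · by_cases h2 : "aeo".toList.contains c = true
      · simp only [h1, h2]
        exact pvAltLoop_cons_aux t cons (voc + 1) _ _
          (by rw [pvC_cons_not t h1]) (by rw [pvV_cons_mem t h2]; ring)
      · simp only [h1, h2]
        exact pvAltLoop_cons_aux t cons voc _ _
          (by rw [pvC_cons_not t h1]) (by rw [pvV_cons_not t h2])

-- ===== VERDICT (by name: the statement is the Claim_ definition above) =====
theorem analisis_linguistico_spec : Claim_equal_analisis_linguistico := by
  intro t _
  unfold Spec_analisis_linguistico analisis_linguistico analisis_linguistico_alt
  simp only [foldl_cons_count, foldl_voc_count, pvAltLoop_eq]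
  rcases h : t.toList with _ | ⟨c, l⟩
  · simp [pvC, pvV]
  · by_cases h1 : (0 + pvC (c :: l) > 2 ∧ 0 + pvV (c :: l) > 2)
    · simp only [ne_eq, reduceCtorEq, not_false_eq_true, decide_true, Bool.true_and]
      rw [if_pos ⟨by omega, by omega⟩]
      simp only [Bool.true_eq, decide_eq_true_eq]
      omega
    · simp only [ne_eq, reduceCtorEq, not_false_eq_true, decide_true, Bool.true_and]
      rw [if_neg (by omega)]
      simp only [Bool.false_eq, decide_eq_false_iff_not]
      omega
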